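-- pv_equiv track=rewrite | github.com/MetaShifter/fleet_controller | word_ladder.py | create_word_dict
-- ===== SOURCE A (Python) =====
-- def create_word_dict(word_list):
--     word_dict = {}
--     for word in word_list:
--         for index in range(len(word)):
--             match_pattern = word[:index] + '_' + word[index + 1:]
--
--             if match_pattern not in word_dict:
--                 word_dict[match_pattern] = set()
--
--             word_dict[match_pattern].add(word)
--     return word_dict
-- ===== SOURCE B (Python) =====
-- def create_word_dict(word_list):
--     # Two-phase: list each word's patterns once, dedup all patterns in
--     # first-occurrence order, then build each pattern's word set by one
--     # membership scan over the per-word pattern sets.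
--     word_pats = [(w, [w[:i] + '_' + w[i + 1:] for i in range(len(w))])
--                  for w in word_list]
--     patterns = dict.fromkeys(p for _, pl in word_pats for p in pl)
--     word_sets = [(w, set(pl)) for w, pl in word_pats]
--     return {p: {w for w, s in word_sets if p in s} for p in patterns}
-- ===== Notes on version B (the rewrite author's own statement) =====
-- stated objective: alternative
-- what changed: A grows a dict of sets incrementally, upserting while walking word*position; B is two-phase: it lists each word's patterns once, dedups the flat pattern list in first-occurrence order, then builds each pattern's word set by a membership scan over the per-word pattern sets.
import Mathlib
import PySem

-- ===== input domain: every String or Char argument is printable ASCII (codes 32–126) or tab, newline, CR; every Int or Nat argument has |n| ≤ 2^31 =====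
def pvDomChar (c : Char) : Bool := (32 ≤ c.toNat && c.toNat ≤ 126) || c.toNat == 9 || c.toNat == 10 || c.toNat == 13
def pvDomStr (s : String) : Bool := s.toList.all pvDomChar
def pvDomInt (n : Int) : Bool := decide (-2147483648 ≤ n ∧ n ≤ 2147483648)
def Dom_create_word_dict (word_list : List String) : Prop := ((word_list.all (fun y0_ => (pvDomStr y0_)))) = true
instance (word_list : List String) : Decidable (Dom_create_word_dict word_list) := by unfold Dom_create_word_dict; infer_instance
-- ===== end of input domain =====

-- B replaces A's incremental insert-into-growing-dict-of-sets by two phases: dedup all patterns, then one scan per pattern; same value, no speed claim.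

-- shared helper: word[:i] + '_' + word[i+1:] (string + ported as List Char append, exact)
def pvPat (w : String) (i : Int) : String :=
  String.ofList (PySem.Chars.slice w.toList none (some i) ++ ['_'] ++ PySem.Chars.slice w.toList (some (i + 1)) none)

-- ===== PORT A =====
def create_word_dict (word_list : List String) : List (String × List String) :=
  (word_list.foldl (fun d w =>
      (PySem.List.pyRange 0 (PySem.Str.len w) 1).foldl (fun d i =>
        let p := pvPat w i
        let d := if d.contains p then d else d.insert p PySem.Set.empty
        d.modify p PySem.Set.empty (fun s => PySem.Set.add s w)) d)
    PySem.Dict.empty).items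

-- ===== PORT B =====
def create_word_dict_alt (word_list : List String) : List (String × List String) :=
  let word_pats := word_list.map (fun w =>
    (w, (PySem.List.pyRange 0 (PySem.Str.len w) 1).map (fun i => pvPat w i)))
  let patterns := PySem.List.dedup (word_pats.flatMap (fun x => x.2))
  let word_sets := word_pats.map (fun x => (x.1, PySem.Set.ofList x.2))
  patterns.map (fun p => (p, PySem.Set.ofList
    ((word_sets.filter (fun x => PySem.Set.contains x.2 p)).map (fun x => x.1))))

-- ===== PRECONDITION & SPEC =====
def Spec_create_word_dict (word_list : List String) (out : List (String × List String)) : Prop := out = create_word_dict_alt word_list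
instance (word_list : List String) (out : List (String × List String)) : Decidable (Spec_create_word_dict word_list out) := by unfold Spec_create_word_dict; infer_instance

-- ===== CLAIM (what is proved, stated in full; the proofs are below) =====
def Claim_equal_create_word_dict : Prop := ∀ (word_list : List String), Dom_create_word_dict word_list → Spec_create_word_dict word_list (create_word_dict word_list)

-- ===== LEMMAS AND PROOFS =====

-- the patterns of one word, and A's loop body as named functions
def pvPats (w : String) : List String :=
  (PySem.List.pyRange 0 (PySem.Str.len w) 1).map (fun i => pvPat w i)

def pvUpsert (w : String) (d : PySem.Dict String (PySem.Set String)) (p : String) :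
    PySem.Dict String (PySem.Set String) :=
  let d := if d.contains p then d else d.insert p PySem.Set.empty
  d.modify p PySem.Set.empty (fun s => PySem.Set.add s w)

def pvStep (d : PySem.Dict String (PySem.Set String)) (w : String) :
    PySem.Dict String (PySem.Set String) :=
  (pvPats w).foldl (pvUpsert w) d

lemma pvA_eq_fold (wl : List String) :
    create_word_dict wl = (wl.foldl pvStep PySem.Dict.empty).items := by
  unfold create_word_dict
  have h : (fun (d : PySem.Dict String (PySem.Set String)) (w : String) =>
      (PySem.List.pyRange 0 (PySem.Str.len w) 1).foldl (fun d i =>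
        let p := pvPat w i
        let d := if d.contains p then d else d.insert p PySem.Set.empty
        d.modify p PySem.Set.empty (fun s => PySem.Set.add s w)) d) = pvStep := by
    funext d w
    rw [pvStep, pvPats, List.foldl_map]
    rfl
  rw [h]

lemma pvKeys_upsert (w p : String) (d : PySem.Dict String (PySem.Set String)) :
    (pvUpsert w d p).keys = PySem.Set.add d.keys p := by
  unfold pvUpsert
  by_cases h : d.contains p = true
  · simp only [h, if_true, PySem.Dict.modify]
    rw [PySem.Dict.keys_insert_of_contains _ _ h,
      PySem.Set.add_of_mem ((PySem.Dict.contains_iff_mem_keys d p).mp h)]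
  · simp only [Bool.not_eq_true] at h
    simp only [h, Bool.false_eq_true, if_false, PySem.Dict.modify,
      PySem.Dict.insert_insert_self]
    rw [PySem.Dict.keys_insert_of_not_contains _ _ h,
      PySem.Set.add_of_not_mem (fun hm => by
        simp [(PySem.Dict.contains_iff_mem_keys d p).mpr hm] at h)]

lemma pvKeys_inner (w : String) (qs : List String) (d : PySem.Dict String (PySem.Set String)) :
    (qs.foldl (pvUpsert w) d).keys = PySem.Set.update d.keys qs := by
  induction qs generalizing d with
  | nil => simp [PySem.Set.update]
  | cons q qs ih => simp [List.foldl_cons, ih, pvKeys_upsert, PySem.Set.update_cons]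

lemma pvKeys_fold (wl : List String) (d : PySem.Dict String (PySem.Set String)) :
    (wl.foldl pvStep d).keys = PySem.Set.update d.keys (wl.flatMap pvPats) := by
  induction wl generalizing d with
  | nil => simp [PySem.Set.update]
  | cons w wl ih =>
    simp only [List.foldl_cons, ih, List.flatMap_cons, PySem.Set.update_append]
    rw [pvStep, pvKeys_inner]

lemma pvGetD_upsert (w p p' : String) (d : PySem.Dict String (PySem.Set String)) :
    (pvUpsert w d p).getD p' PySem.Set.empty =
      if p' = p then PySem.Set.add (d.getD p' PySem.Set.empty) w
      else d.getD p' PySem.Set.empty := by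
  unfold pvUpsert
  by_cases h : d.contains p = true
  · simp only [h, if_true, PySem.Dict.getD_modify]
    by_cases hp : p' = p
    · subst hp; rfl
    · simp [hp]
  · simp only [Bool.not_eq_true] at h
    simp only [h, Bool.false_eq_true, if_false, PySem.Dict.modify,
      PySem.Dict.insert_insert_self, PySem.Dict.getD_insert,
      PySem.Dict.getD_of_not_contains _ _ h]
    by_cases hp : p' = p
    · subst hp
      simp [PySem.Dict.getD_of_not_contains _ _ h, PySem.Set.add]
    · simp [hp]

lemma pvGetD_inner (w p : String) (qs : List String) (d : PySem.Dict String (PySem.Set String)) :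
    (qs.foldl (pvUpsert w) d).getD p PySem.Set.empty =
      if p ∈ qs then PySem.Set.add (d.getD p PySem.Set.empty) w
      else d.getD p PySem.Set.empty := by
  induction qs generalizing d with
  | nil => simp
  | cons q qs ih =>
    simp only [List.foldl_cons, ih, pvGetD_upsert, List.mem_cons]
    by_cases hq : p = q
    · subst hq; simp
    · simp [hq]

lemma pvGetD_fold (p : String) (wl : List String) (d : PySem.Dict String (PySem.Set String)) :
    (wl.foldl pvStep d).getD p PySem.Set.empty =
      PySem.Set.update (d.getD p PySem.Set.empty)
        (wl.filter (fun w => decide (p ∈ pvPats w))) := by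
  induction wl generalizing d with
  | nil => simp [PySem.Set.update]
  | cons w wl ih =>
    simp only [List.foldl_cons, ih, List.filter_cons]
    rw [pvStep, pvGetD_inner]
    by_cases hm : p ∈ pvPats w
    · simp [hm, PySem.Set.update_cons]
    · simp [hm]

lemma pvContains_ofList (qs : List String) (p : String) :
    PySem.Set.contains (PySem.Set.ofList qs) p = decide (p ∈ qs) := by
  rw [Bool.eq_iff_iff]
  simp [PySem.Set.mem_ofList]

-- ===== VERDICT (by name: the statement is the Claim_ definition above) =====
theorem create_word_dict_spec : Claim_equal_create_word_dict := by
  intro wl _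
  unfold Spec_create_word_dict
  rw [pvA_eq_fold]
  have hkeys : (wl.foldl pvStep PySem.Dict.empty).keys =
      PySem.Set.ofList (wl.flatMap pvPats) := by
    rw [pvKeys_fold]; simp [PySem.Set.update_nil_left]
  have hnd : (wl.foldl pvStep PySem.Dict.empty).keys.Nodup := by
    rw [hkeys]; exact PySem.Set.nodup_ofList _
  rw [PySem.Dict.items_eq_map_keys _ hnd PySem.Set.empty, hkeys]
  unfold create_word_dict_alt
  have hwp : (fun w => (w, (PySem.List.pyRange 0 (PySem.Str.len w) 1).map (fun i => pvPat w i)))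
      = (fun w => (w, pvPats w)) := rfl
  rw [hwp]
  simp only [List.flatMap_map, List.map_map, List.filter_map, PySem.List.dedup_eq_ofList,
    Function.comp_def]
  apply List.map_congr_left
  intro p _
  rw [pvGetD_fold]
  have hf : wl.filter (fun w => PySem.Set.contains (PySem.Set.ofList (pvPats w)) p) =
      wl.filter (fun w => decide (p ∈ pvPats w)) :=
    List.filter_congr (fun w _ => pvContains_ofList (pvPats w) p)
  simp only [PySem.Dict.getD_empty]
  rw [hf]
  simp [PySem.Set.empty, PySem.Set.update_nil_left]
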